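-- pv_equiv track=rewrite | github.com/Cjkeenan/rsa-hash_steganography | RSA_Encryption/rsa.py | generatePublic
-- ===== SOURCE A (Python) =====
-- def euclidAlgo(larger, smaller):
--     if(smaller > larger):
--         temp = larger
--         larger = smaller
--         smaller = temp
--
--     rem = larger % smaller
--
--     if(rem == 0):
--         return smaller
--
--     return euclidAlgo(smaller, rem)
--
-- def generatePublic(p,q):
--     n = p*q
--     phi = (p-1)*(q-1)
--
--     e = 2
--     while(euclidAlgo(e,phi) != 1):
--         e = e+1
--     if(e >= phi):
--         return( "not possible since e < phi(n), phi(n)={0} and e = {1}" .format(phi,e))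
--     return e
-- ===== SOURCE B (Python) =====
-- def generatePublic(p, q):
--     phi = (p - 1) * (q - 1)
--     e = 2
--     while any(e % d == 0 and phi % d == 0 for d in range(2, e + 1)):
--         e += 1
--     return e
-- ===== Notes on version B (the rewrite author's own statement) =====
-- stated objective: alternative
-- what changed: B drops the recursive Euclid gcd helper entirely and instead tests coprimality of e with phi by trial division: it scans for a common divisor d in 2..e, so the candidate loop stops at the same smallest e with gcd(e,phi)=1.
-- outside the precondition, e.g. on generatePublic(2, 2): A returns 'not possible since e < phi(n), phi(n)=1 and e = 2', B returns 2; on generatePublic(2, 3): A returns 'not possible since e < phi(n), phi(n)=2 and e = 3', B returns 3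
import Mathlib
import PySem

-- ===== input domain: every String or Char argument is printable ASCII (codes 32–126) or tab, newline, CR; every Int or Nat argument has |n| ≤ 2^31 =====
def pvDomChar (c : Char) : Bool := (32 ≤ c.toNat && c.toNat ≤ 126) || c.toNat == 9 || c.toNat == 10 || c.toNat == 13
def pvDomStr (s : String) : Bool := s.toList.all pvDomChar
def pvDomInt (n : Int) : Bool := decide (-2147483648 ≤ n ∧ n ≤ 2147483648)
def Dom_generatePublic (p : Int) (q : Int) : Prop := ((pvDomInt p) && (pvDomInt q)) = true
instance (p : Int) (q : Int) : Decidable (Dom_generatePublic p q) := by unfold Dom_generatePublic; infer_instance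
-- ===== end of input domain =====

-- B replaces A's recursive Euclid gcd test by a direct common-divisor (trial-division) test; objective: alternative algorithm, same scan result.

-- ===== PORT A =====
-- euclidAlgo, literal: swap so larger ≥ smaller, rem = larger % smaller (Python mod), return smaller on rem == 0, else recurse.
-- fuel only makes the recursion total (Python diverges/raises outside Pre_); inside Pre_ the fuel given at the call site suffices.
def euclidAlgoA (fuel : Nat) (larger : Int) (smaller : Int) : Int :=
  match fuel with
  | 0 => 0
  | f + 1 =>
    let ls := if smaller > larger then (smaller, larger) else (larger, smaller)
    let rem := PySem.Int.mod ls.1 ls.2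
    if rem = 0 then ls.2 else euclidAlgoA f ls.2 rem

-- the while loop: e = 2; while euclidAlgo(e, phi) != 1: e += 1   (fuel = totality guard only)
def gpLoopA (fuel : Nat) (phi : Int) (e : Int) : Int :=
  match fuel with
  | 0 => e
  | f + 1 =>
    if euclidAlgoA (e.natAbs + phi.natAbs + 2) e phi ≠ 1 then gpLoopA f phi (e + 1) else e

def generatePublic (p : Int) (q : Int) : Int :=
  let _n := p * q
  let phi := (p - 1) * (q - 1)
  let e := gpLoopA (phi.natAbs + 2) phi 2
  if e ≥ phi then 0  -- Python returns a format STRING here (not an int); excluded by Pre_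
  else e

-- ===== PORT B =====
-- e = 2; while any(e % d == 0 and phi % d == 0 for d in range(2, e + 1)): e += 1; return e
def gpLoopB (fuel : Nat) (phi : Int) (e : Int) : Int :=
  match fuel with
  | 0 => e
  | f + 1 =>
    if (PySem.List.pyRange 2 (e + 1) 1).any
        (fun d => PySem.Int.mod e d == 0 && PySem.Int.mod phi d == 0) then
      gpLoopB f phi (e + 1)
    else e

def generatePublic_alt (p : Int) (q : Int) : Int :=
  let phi := (p - 1) * (q - 1)
  gpLoopB (phi.natAbs + 2) phi 2

-- ===== PRECONDITION & SPEC =====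
-- Pre_ excludes inputs with phi = (p-1)*(q-1) < 3: there A diverges (phi < 0), raises ZeroDivisionError (phi = 0),
-- or returns a formatted error STRING instead of an int (phi ∈ {1, 2}).
def Pre_generatePublic (p : Int) (q : Int) : Prop := 3 ≤ (p - 1) * (q - 1)
instance (p : Int) (q : Int) : Decidable (Pre_generatePublic p q) := by unfold Pre_generatePublic; infer_instance
def pvWitness_generatePublic : Int × Int := (5, 7)

def Spec_generatePublic (p : Int) (q : Int) (out : Int) : Prop := out = generatePublic_alt p q
instance (p : Int) (q : Int) (out : Int) : Decidable (Spec_generatePublic p q out) := by unfold Spec_generatePublic; infer_instance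

-- ===== CLAIM (what is proved, stated in full; the proofs are below) =====
def Claim_equal_generatePublic : Prop := ∀ (p : Int) (q : Int), Dom_generatePublic p q → Pre_generatePublic p q → Spec_generatePublic p q (generatePublic p q)

-- ===== LEMMAS AND PROOFS =====

-- A's euclidAlgo computes gcd on positive arguments, given enough fuel.
theorem euclidAlgoA_eq_gcd (fuel : Nat) (a b : Int) (ha : 0 < a) (hb : 0 < b)
    (hfuel : (min a b).natAbs < fuel) : euclidAlgoA fuel a b = (Int.gcd a b : Int) := by
  induction fuel generalizing a b with
  | zero => omega
  | succ f ih =>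
    simp only [euclidAlgoA]
    by_cases hswap : b > a
    · rw [if_pos hswap]
      have hmod : PySem.Int.mod b a = b % a := PySem.Int.mod_eq_emod_of_pos ha
      simp only [hmod]
      by_cases hrem : b % a = 0
      · rw [if_pos hrem]
        have hdvd : a ∣ b := Int.dvd_of_emod_eq_zero hrem
        rw [Int.gcd_comm, Int.gcd_eq_natAbs_right_iff_dvd.mpr hdvd]
        omega
      · rw [if_neg hrem]
        have hr0 : 0 < b % a := lt_of_le_of_ne (Int.emod_nonneg b (by omega)) (Ne.symm hrem)
        have hrlt : b % a < a := Int.emod_lt_of_pos b ha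
        have : euclidAlgoA f a (b % a) = (Int.gcd a (b % a) : Int) := by
          apply ih a (b % a) ha hr0
          omega
        rw [this, Int.gcd_comm a (b % a), Int.gcd_emod, Int.gcd_comm]
    · rw [if_neg hswap]
      have hmod : PySem.Int.mod a b = a % b := PySem.Int.mod_eq_emod_of_pos hb
      simp only [hmod]
      by_cases hrem : a % b = 0
      · rw [if_pos hrem]
        have hdvd : b ∣ a := Int.dvd_of_emod_eq_zero hrem
        rw [Int.gcd_eq_natAbs_right_iff_dvd.mpr hdvd]
        omega
      · rw [if_neg hrem]
        have hr0 : 0 < a % b := lt_of_le_of_ne (Int.emod_nonneg a (by omega)) (Ne.symm hrem)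
        have hrlt : a % b < b := Int.emod_lt_of_pos a hb
        have : euclidAlgoA f b (a % b) = (Int.gcd b (a % b) : Int) := by
          apply ih b (a % b) hb hr0
          omega
        rw [this, Int.gcd_comm b (a % b), Int.gcd_emod]

-- B's any-test over range(2, e+1) is exactly "gcd(e, phi) ≠ 1" for e ≥ 2, phi ≥ 1.
theorem anyDiv_iff_gcd_ne_one (e phi : Int) (he : 2 ≤ e) (_hphi : 1 ≤ phi) :
    ((PySem.List.pyRange 2 (e + 1) 1).any
      (fun d => PySem.Int.mod e d == 0 && PySem.Int.mod phi d == 0) = true) ↔ Int.gcd e phi ≠ 1 := by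
  rw [List.any_eq_true]
  constructor
  · rintro ⟨d, hmem, hd⟩
    rw [PySem.List.mem_pyRange_one] at hmem
    simp only [Bool.and_eq_true, beq_iff_eq, PySem.Int.mod_eq_zero_iff_dvd] at hd
    have h1 : d.natAbs ∣ Int.gcd e phi :=
      Nat.dvd_gcd (Int.natAbs_dvd_natAbs.mpr hd.1) (Int.natAbs_dvd_natAbs.mpr hd.2)
    have h2 : 2 ≤ d.natAbs := by omega
    have h3 : Int.gcd e phi ≠ 0 := by
      intro h0
      rw [Int.gcd_eq_zero_iff] at h0
      omega
    have := Nat.le_of_dvd (Nat.pos_of_ne_zero h3) h1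
    omega
  · intro hne
    refine ⟨(Int.gcd e phi : Int), ?_, ?_⟩
    · rw [PySem.List.mem_pyRange_one]
      have h3 : Int.gcd e phi ≠ 0 := by
        intro h0
        rw [Int.gcd_eq_zero_iff] at h0
        omega
      have hle : (Int.gcd e phi : Int) ≤ e := Int.le_of_dvd (by omega) (Int.gcd_dvd_left e phi)
      omega
    · simp only [Bool.and_eq_true, beq_iff_eq, PySem.Int.mod_eq_zero_iff_dvd]
      exact ⟨Int.gcd_dvd_left e phi, Int.gcd_dvd_right e phi⟩

theorem gpLoop_eq (fuel : Nat) (phi : Int) (hphi : 3 ≤ phi) :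
    ∀ e : Int, 2 ≤ e → gpLoopA fuel phi e = gpLoopB fuel phi e := by
  induction fuel with
  | zero => intro e _; rfl
  | succ f ih =>
    intro e he
    simp only [gpLoopA, gpLoopB]
    rw [euclidAlgoA_eq_gcd _ e phi (by omega) (by omega) (by omega)]
    by_cases hc : (PySem.List.pyRange 2 (e + 1) 1).any
        (fun d => PySem.Int.mod e d == 0 && PySem.Int.mod phi d == 0) = true
    · have hg : Int.gcd e phi ≠ 1 := (anyDiv_iff_gcd_ne_one e phi he (by omega)).mp hc
      rw [if_pos hc, if_pos (by exact_mod_cast hg)]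
      exact ih (e + 1) (by omega)
    · have hg : Int.gcd e phi = 1 := by
        by_contra h
        exact hc ((anyDiv_iff_gcd_ne_one e phi he (by omega)).mpr h)
      rw [if_neg (by simp [hg]), if_neg hc]

theorem gpLoopA_le (fuel : Nat) (phi : Int) (hphi : 3 ≤ phi) :
    ∀ e : Int, 2 ≤ e → e ≤ phi - 1 → (phi - 1 - e).toNat < fuel → gpLoopA fuel phi e ≤ phi - 1 := by
  induction fuel with
  | zero => intro e _ _ h; omega
  | succ f ih =>
    intro e he hle hfuel
    simp only [gpLoopA]
    rw [euclidAlgoA_eq_gcd _ e phi (by omega) (by omega) (by omega)]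
    by_cases hg : Int.gcd e phi = 1
    · rw [if_neg (by simp [hg])]
      exact hle
    · rw [if_pos (by exact_mod_cast hg)]
      have hcop : Int.gcd (phi - 1) phi = 1 := by
        have hn : phi.natAbs = (phi - 1).natAbs + 1 := by omega
        simp [Int.gcd, hn]
      have hne : e ≠ phi - 1 := by
        intro h
        rw [h] at hg
        exact hg hcop
      exact ih (e + 1) (by omega) (by omega) (by omega)

-- ===== VERDICT =====
theorem generatePublic_spec : Claim_equal_generatePublic := by
  intro p q _hdom hpre
  unfold Spec_generatePublic generatePublic generatePublic_alt
  set phi := (p - 1) * (q - 1) with hphi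
  have h3 : 3 ≤ phi := hpre
  have hle : gpLoopA (phi.natAbs + 2) phi 2 ≤ phi - 1 := by
    apply gpLoopA_le _ _ h3 _ (by norm_num) (by omega) (by omega)
  have key : gpLoopA (phi.natAbs + 2) phi 2 = gpLoopB (phi.natAbs + 2) phi 2 :=
    gpLoop_eq _ _ h3 _ (by norm_num)
  show (if gpLoopA (phi.natAbs + 2) phi 2 ≥ phi then 0 else gpLoopA (phi.natAbs + 2) phi 2)
      = gpLoopB (phi.natAbs + 2) phi 2
  rw [if_neg (by omega), key]
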